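-- pv_equiv track=rewrite | github.com/uservan/cross_domain | verify/score/puzzle_tasks/binario/verifier.py | is_valid_binario
-- ===== SOURCE A (Python) =====
-- def is_valid_binario(board):
--     """
--     Verify if a Binario solution follows the rules.
--     """
--     size = len(board)
--     half_size = size // 2
--
--     # Check if each row and column follows the rules
--     def is_valid_unit(unit):
--         return unit.count(0) <= half_size and unit.count(1) <= half_size and all(
--             unit[i] != unit[i + 1] or unit[i + 1] != unit[i + 2]
--             for i in range(len(unit) - 2)
--         )
--
--     # Verify all rows
--     for row in board:
--         if not is_valid_unit(row):
--             return False
--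
--     # Verify all columns
--     for col in zip(*board):
--         if not is_valid_unit(list(col)):
--             return False
--
--     return True
-- ===== SOURCE B (Python) =====
-- def is_valid_binario(board):
--     # One sweep over the cells: per-column accumulators (zero count, one count,
--     # last two values) are updated while each row is scanned, so the board is
--     # never transposed and no per-unit helper re-scans a unit.
--     half = len(board) // 2
--     ncols = min(map(len, board), default=0)
--     col_state = [(0, 0, None, None) for _ in range(ncols)]
--     for row in board:
--         z = o = 0
--         p2 = p1 = None
--         for j, v in enumerate(row):
--             if v == 0:
--                 z += 1
--             elif v == 1:
--                 o += 1
--             if p2 is not None and p2 == p1 == v: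
--                 return False
--             p2, p1 = p1, v
--             if j < ncols:
--                 cz, co, c2, c1 = col_state[j]
--                 if v == 0:
--                     cz += 1
--                 elif v == 1:
--                     co += 1
--                 if c2 is not None and c2 == c1 == v:
--                     return False
--                 col_state[j] = (cz, co, c1, v)
--         if z > half or o > half:
--             return False
--     for cz, co, _, _ in col_state:
--         if cz > half or co > half:
--             return False
--     return True
-- ===== Notes on version B (the rewrite author's own statement) =====
-- stated objective: alternative
-- what changed: Instead of validating rows and then transposed columns with a per-unit helper, B makes a single sweep over the cells, maintaining per-column accumulators (zero count, one count, last two values) in an array updated while each row is scanned, so the board is never transposed and no unit is re-scanned; counts are checked at row end / after the sweep and triples are detected on the fly.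
import Mathlib
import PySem

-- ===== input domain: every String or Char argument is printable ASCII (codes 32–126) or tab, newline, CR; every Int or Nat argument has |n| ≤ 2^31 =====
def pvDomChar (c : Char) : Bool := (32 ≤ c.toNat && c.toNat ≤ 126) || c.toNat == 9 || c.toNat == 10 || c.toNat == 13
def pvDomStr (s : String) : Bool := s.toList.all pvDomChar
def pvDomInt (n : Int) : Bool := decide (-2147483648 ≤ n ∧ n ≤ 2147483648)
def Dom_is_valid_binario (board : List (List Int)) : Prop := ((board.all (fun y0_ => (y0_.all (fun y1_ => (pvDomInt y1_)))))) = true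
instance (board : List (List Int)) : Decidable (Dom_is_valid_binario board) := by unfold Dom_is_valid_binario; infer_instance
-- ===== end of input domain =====

-- B replaces A's transpose-then-check-each-unit scheme by a single sweep over the cells that
-- maintains per-column accumulators (zero count, one count, last two values) in an array; same cost class.

-- ===== PORT A =====

-- zip(*board): truncating transpose, transliteration of Python's zip(*rows)
def zipCols (rows : List (List Int)) : List (List Int) :=
  if h : rows.isEmpty || rows.any (·.isEmpty) then []
  else (rows.map (fun r => r.headD 0)) :: zipCols (rows.map List.tail)
termination_by (rows.headD []).length
decreasing_by
  simp only [Bool.or_eq_true, List.isEmpty_iff, List.any_eq_true, not_or, not_exists] at h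
  obtain ⟨h1, h2⟩ := h
  rcases rows with _ | ⟨r, rs⟩
  · exact absurd rfl h1
  · rcases r with _ | ⟨x, xs⟩
    · exact absurd (by simp) (h2 [])
    · simp

-- is_valid_unit, A's three-pass version
def isValidUnit (half : Int) (unit : List Int) : Bool :=
  decide ((PySem.List.count unit 0 : Int) ≤ half) &&
  decide ((PySem.List.count unit 1 : Int) ≤ half) &&
  (PySem.List.pyRange 0 ((unit.length : Int) - 2) 1).all (fun i =>
    decide (PySem.List.pyGet? unit i ≠ PySem.List.pyGet? unit (i + 1)) ||
    decide (PySem.List.pyGet? unit (i + 1) ≠ PySem.List.pyGet? unit (i + 2)))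

def is_valid_binario (board : List (List Int)) : Bool :=
  let half := PySem.Int.floordiv (board.length : Int) 2
  board.all (fun row => isValidUnit half row) &&
  (zipCols board).all (fun col => isValidUnit half col)

-- ===== PORT B =====
-- Source B: one sweep over the cells; per-column state = (zeros, ones, second-last value, last value).

-- ncols = min(map(len, board), default=0)
def minLen : List (List Int) → Nat
  | [] => 0
  | r :: rs => rs.foldl (fun m r' => min m r'.length) r.length

-- the `if j < ncols:` body: update one column state; none = `return False` (triple in a column);
-- `c2 is not None and c2 == c1 == v` is encoded as c2 = some v ∧ c1 = some v (equivalent for ints)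
def stepCol (v : Int) (c : Int × Int × Option Int × Option Int) :
    Option (Int × Int × Option Int × Option Int) :=
  let cz := if v = 0 then c.1 + 1 else c.1
  let co := if v = 0 then c.2.1 else if v = 1 then c.2.1 + 1 else c.2.1
  if c.2.2.1 = some v ∧ c.2.2.2 = some v then none
  else some (cz, co, c.2.2.2, some v)

-- the inner `for j, v in enumerate(row)` loop plus the row-count check after it;
-- cst holds the not-yet-visited column states of this row, none = `return False`
def procRow (half : Int) : List Int → List (Int × Int × Option Int × Option Int) →
    Int → Int → Option Int → Option Int → Option (List (Int × Int × Option Int × Option Int))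
  | [], cst, z, o, _, _ => if z > half ∨ o > half then none else some cst
  | v :: vs, cst, z, o, p2, p1 =>
    let z' := if v = 0 then z + 1 else z
    let o' := if v = 0 then o else if v = 1 then o + 1 else o
    if p2 = some v ∧ p1 = some v then none
    else
      match cst with
      | [] => procRow half vs [] z' o' p1 (some v)
      | c :: cst' =>
        match stepCol v c with
        | none => none
        | some c' => (procRow half vs cst' z' o' p1 (some v)).map (c' :: ·)

-- the outer `for row in board` loop threading col_state
def mainFold (half : Int) : List (List Int) → List (Int × Int × Option Int × Option Int) →
    Option (List (Int × Int × Option Int × Option Int))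
  | [], cst => some cst
  | r :: rs, cst =>
    match procRow half r cst 0 0 none none with
    | none => none
    | some cst' => mainFold half rs cst'

def is_valid_binario_alt (board : List (List Int)) : Bool :=
  let half := PySem.Int.floordiv (board.length : Int) 2
  match mainFold half board (List.replicate (minLen board) ((0:Int), (0:Int), (none : Option Int), (none : Option Int))) with
  | none => false
  | some fin => fin.all (fun c => decide (c.1 ≤ half) && decide (c.2.1 ≤ half))

-- ===== PRECONDITION & SPEC =====
def Spec_is_valid_binario (board : List (List Int)) (out : Bool) : Prop := out = is_valid_binario_alt board
instance (board : List (List Int)) (out : Bool) : Decidable (Spec_is_valid_binario board out) := by unfold Spec_is_valid_binario; infer_instance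

-- ===== CLAIM (what is proved, stated in full; the proofs are below) =====
def Claim_equal_is_valid_binario : Prop := ∀ (board : List (List Int)), Dom_is_valid_binario board → Spec_is_valid_binario board (is_valid_binario board)

-- ===== LEMMAS AND PROOFS =====

-- clean spec of "no three consecutive equal values"
def noTriple3 : List Int → Bool
  | a :: b :: c :: rest => decide (¬(a = b ∧ b = c)) && noTriple3 (b :: c :: rest)
  | _ => true

-- "no triple" relative to the two previously seen values
def noTF : Option Int → Option Int → List Int → Bool
  | _, _, [] => true
  | p2, p1, v :: rest => if p2 = some v ∧ p1 = some v then false else noTF p1 (some v) rest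

lemma noTF_some_some : ∀ (l : List Int) (a b : Int), noTF (some a) (some b) l = noTriple3 (a :: b :: l) := by
  intro l
  induction l with
  | nil => intro a b; simp [noTF, noTriple3]
  | cons v rest ih =>
    intro a b
    simp only [noTF, noTriple3, Option.some.injEq, ih]
    by_cases h2 : b = v
    · subst h2
      by_cases h1 : a = b <;> simp [h1]
    · simp [h2]

lemma noTF_none_some (l : List Int) (b : Int) : noTF none (some b) l = noTriple3 (b :: l) := by
  cases l with
  | nil => simp [noTF, noTriple3]
  | cons v rest =>
    simp only [noTF, show ((none : Option Int) = some v ∧ (some b : Option Int) = some v) ↔ False from by simp, if_neg (by simp : ¬False)]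
    exact noTF_some_some rest b v

lemma noTF_none_none (l : List Int) : noTF none none l = noTriple3 l := by
  cases l with
  | nil => rfl
  | cons v rest =>
    simp only [noTF, show ((none : Option Int) = some v ∧ (none : Option Int) = some v) ↔ False from by simp, if_neg (by simp : ¬False)]
    exact noTF_none_some rest v

-- A's index-window all(...) equals noTriple3
lemma aux_triple : ∀ u : List Int,
    (List.range (u.length - 2)).all
      (fun k => decide (u[k]? ≠ u[k + 1]?) || decide (u[k + 1]? ≠ u[k + 2]?)) = noTriple3 u := by
  intro u
  induction u with
  | nil => simp [noTriple3]
  | cons a u' ih =>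
    cases u' with
    | nil => simp [noTriple3]
    | cons b u'' =>
      cases u'' with
      | nil => simp [noTriple3]
      | cons c rest =>
        have hlen : (a :: b :: c :: rest).length - 2 = (rest.length + 1) := by simp
        rw [hlen, List.range_succ_eq_map, List.all_cons, List.all_map]
        have htail :
            (List.range (rest.length + 1 - 1)).all
              ((fun k => decide ((a :: b :: c :: rest)[k]? ≠ (a :: b :: c :: rest)[k + 1]?) ||
                 decide ((a :: b :: c :: rest)[k + 1]? ≠ (a :: b :: c :: rest)[k + 2]?)) ∘ Nat.succ) =
            noTriple3 (b :: c :: rest) := by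
          rw [← ih]
          simp only [List.length_cons]
          have hr : rest.length + 1 - 1 = rest.length + 1 + 1 - 2 := by omega
          rw [hr]
          congr 1
        simp only [Nat.add_sub_cancel] at htail
        rw [htail]
        have hfac : (decide ((a :: b :: c :: rest)[0]? ≠ (a :: b :: c :: rest)[0 + 1]?) ||
            decide ((a :: b :: c :: rest)[0 + 1]? ≠ (a :: b :: c :: rest)[0 + 2]?)) =
            decide (¬(a = b ∧ b = c)) := by
          by_cases h1 : a = b <;> by_cases h2 : b = c <;> simp [h1, h2]
        rw [hfac]
        simp [noTriple3]

lemma pyAll_eq_noTriple3 (u : List Int) :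
    (PySem.List.pyRange 0 ((u.length : Int) - 2) 1).all (fun i =>
      decide (PySem.List.pyGet? u i ≠ PySem.List.pyGet? u (i + 1)) ||
      decide (PySem.List.pyGet? u (i + 1) ≠ PySem.List.pyGet? u (i + 2))) = noTriple3 u := by
  rw [PySem.List.pyRange_one, List.all_map]
  have ht : (((u.length : Int) - 2) - 0).toNat = u.length - 2 := by omega
  rw [ht, ← aux_triple u]
  congr 1
  funext k
  simp only [Function.comp_apply, zero_add]
  have e2 : ((k : Int) + 1) = ((k + 1 : Nat) : Int) := by push_cast; ring
  have e3 : ((k : Int) + 2) = ((k + 2 : Nat) : Int) := by push_cast; ring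
  rw [e2, e3]
  simp only [PySem.List.pyGet?_natCast]

lemma isValidUnit_char (half : Int) (u : List Int) :
    isValidUnit half u =
      (decide ((u.count 0 : Int) ≤ half) && decide ((u.count 1 : Int) ≤ half) && noTriple3 u) := by
  rw [isValidUnit, pyAll_eq_noTriple3]
  simp only [PySem.List.count_eq]
  rfl

-- ---- B-side characterization ----

-- the row-scan verdict of procRow, isolated
def rowRun (half z o : Int) (p2 p1 : Option Int) (vs : List Int) : Bool :=
  noTF p2 p1 vs && decide (z + (vs.count 0 : Int) ≤ half) && decide (o + (vs.count 1 : Int) ≤ half)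

-- the column part of procRow, isolated (per-cell stepCol over parallel lists)
def colsPart : List Int → List (Int × Int × Option Int × Option Int) →
    Option (List (Int × Int × Option Int × Option Int))
  | _, [] => some []
  | [], cst => some cst
  | v :: vs, c :: cst =>
    match stepCol v c with
    | none => none
    | some c' => (colsPart vs cst).map (c' :: ·)

def colsFold : List (List Int) → List (Int × Int × Option Int × Option Int) →
    Option (List (Int × Int × Option Int × Option Int))
  | [], cst => some cst
  | r :: rs, cst =>
    match colsPart r cst with
    | none => none
    | some cst' => colsFold rs cst'

lemma colsPart_nil (cst : List (Int × Int × Option Int × Option Int)) :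
    colsPart [] cst = some cst := by
  cases cst <;> rfl

lemma colsPart_nil_right (vs : List Int) : colsPart vs [] = some [] := by
  cases vs <;> rfl

lemma procRow_eq (half : Int) : ∀ (vs : List Int) cst (z o : Int) (p2 p1 : Option Int),
    procRow half vs cst z o p2 p1 =
      if rowRun half z o p2 p1 vs then colsPart vs cst else none := by
  intro vs
  induction vs with
  | nil =>
    intro cst z o p2 p1
    simp only [procRow, rowRun, noTF, colsPart_nil, List.count_nil, Bool.true_and,
      Bool.and_eq_true, decide_eq_true_eq]
    split_ifs with h1 h2 <;> first | rfl | (exfalso; push_cast at *; omega)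
  | cons v vs' ih =>
    intro cst z o p2 p1
    have hshift : rowRun half z o p2 p1 (v :: vs') =
        (if p2 = some v ∧ p1 = some v then false
         else rowRun half (if v = 0 then z + 1 else z)
                (if v = 0 then o else if v = 1 then o + 1 else o) p1 (some v) vs') := by
      simp only [rowRun, noTF]
      by_cases ht : p2 = some v ∧ p1 = some v
      · simp [ht]
      · rw [if_neg ht, if_neg ht]
        have hc0 : ((v :: vs').count 0 : Int) = (vs'.count 0 : Int) + (if v = 0 then 1 else 0) := by
          rcases eq_or_ne v 0 with h | h <;> simp [List.count_cons, h] <;> push_cast <;> ring_nf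
        have hc1 : ((v :: vs').count 1 : Int) = (vs'.count 1 : Int) + (if v = 1 then 1 else 0) := by
          rcases eq_or_ne v 1 with h | h <;> simp [List.count_cons, h] <;> push_cast <;> ring
        rw [hc0, hc1]
        have e1 : z + ((vs'.count 0 : Int) + (if v = 0 then 1 else 0)) =
            (if v = 0 then z + 1 else z) + (vs'.count 0 : Int) := by
          split_ifs <;> ring
        have e2 : o + ((vs'.count 1 : Int) + (if v = 1 then 1 else 0)) =
            (if v = 0 then o else if v = 1 then o + 1 else o) + (vs'.count 1 : Int) := by
          by_cases h0 : v = 0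
          · subst h0
            norm_num
          · simp only [h0, if_false]
            split_ifs <;> ring
        rw [e1, e2]
    simp only [procRow]
    by_cases ht : p2 = some v ∧ p1 = some v
    · rw [if_pos ht]
      rw [hshift, if_pos ht]
      simp
    · rw [if_neg ht, hshift, if_neg ht]
      cases cst with
      | nil =>
        simp only [ih]
        rw [colsPart_nil_right, colsPart_nil_right]
      | cons c cst' =>
        cases hstep : stepCol v c with
        | none =>
          simp only [colsPart, hstep]
          by_cases hr : rowRun half (if v = 0 then z + 1 else z)
              (if v = 0 then o else if v = 1 then o + 1 else o) p1 (some v) vs' = true <;> simp [hr]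
        | some c' =>
          simp only [colsPart, hstep, ih]
          by_cases hr : rowRun half (if v = 0 then z + 1 else z)
              (if v = 0 then o else if v = 1 then o + 1 else o) p1 (some v) vs' = true <;> simp [hr]

lemma mainFold_eq (half : Int) : ∀ rows cst,
    mainFold half rows cst =
      if rows.all (fun r => rowRun half 0 0 none none r) then colsFold rows cst else none := by
  intro rows
  induction rows with
  | nil => intro cst; simp [mainFold, colsFold]
  | cons r rs ih =>
    intro cst
    simp only [mainFold, List.all_cons, procRow_eq]
    by_cases hr : rowRun half 0 0 none none r
    · rw [if_pos hr]
      cases hc : colsPart r cst with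
      | none =>
        simp only [colsFold, hc, hr, Bool.true_and]
        by_cases ha : rs.all (fun r => rowRun half 0 0 none none r) <;> simp [ha]
      | some cst' =>
        simp only [colsFold, hc, hr, Bool.true_and, ih]
    · simp [hr]

-- feeding a whole list into one column state
def feed : List Int → (Int × Int × Option Int × Option Int) →
    Option (Int × Int × Option Int × Option Int)
  | [], c => some c
  | v :: vs, c =>
    match stepCol v c with
    | none => none
    | some c' => feed vs c'

def lastTwo : Option Int → Option Int → List Int → Option Int × Option Int
  | p2, p1, [] => (p2, p1)
  | _, p1, v :: vs => lastTwo p1 (some v) vs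

lemma feed_eq : ∀ (l : List Int) (z o : Int) (p2 p1 : Option Int),
    feed l (z, o, p2, p1) =
      if noTF p2 p1 l then
        some (z + (l.count 0 : Int), o + (l.count 1 : Int), (lastTwo p2 p1 l).1, (lastTwo p2 p1 l).2)
      else none := by
  intro l
  induction l with
  | nil =>
    intro z o p2 p1
    simp [feed, noTF, lastTwo]
  | cons v vs ih =>
    intro z o p2 p1
    by_cases ht : p2 = some v ∧ p1 = some v
    · simp [feed, stepCol, noTF, ht]
    · have hstep : stepCol v (z, o, p2, p1) =
          some ((if v = 0 then z + 1 else z),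
            (if v = 0 then o else if v = 1 then o + 1 else o), p1, some v) := by
        simp only [stepCol]
        rw [if_neg ht]
      simp only [feed, hstep, noTF, lastTwo]
      rw [if_neg ht, ih]
      by_cases hn : noTF p1 (some v) vs = true
      · rw [if_pos hn, if_pos hn]
        have hc0 : z + ((v :: vs).count 0 : Int) =
            (if v = 0 then z + 1 else z) + (vs.count 0 : Int) := by
          by_cases h : v = 0 <;> simp [List.count_cons, h] <;> push_cast <;> ring
        have hc1 : o + ((v :: vs).count 1 : Int) =
            (if v = 0 then o else if v = 1 then o + 1 else o) + (vs.count 1 : Int) := by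
          by_cases h0 : v = 0
          · subst h0
            simp [List.count_cons]
          · by_cases h1 : v = 1 <;> simp [List.count_cons, h0, h1] <;> push_cast <;> ring
        rw [hc0, hc1]
      · rw [if_neg hn, if_neg hn]

-- peeling one column state off colsFold: it gets fed exactly the heads of the rows
lemma colsFold_peel : ∀ (rows : List (List Int)) (c : Int × Int × Option Int × Option Int) cst,
    (∀ r ∈ rows, r ≠ []) →
    colsFold rows (c :: cst) =
      match feed (rows.map (fun r => r.headD 0)) c with
      | none => none
      | some c' => (colsFold (rows.map List.tail) cst).map (c' :: ·) := by
  intro rows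
  induction rows with
  | nil =>
    intro c cst _
    simp [colsFold, feed]
  | cons r rs ih =>
    intro c cst hne
    obtain ⟨v, vs, rfl⟩ : ∃ v vs, r = v :: vs := by
      cases r with
      | nil => exact absurd rfl (hne [] (by simp))
      | cons v vs => exact ⟨v, vs, rfl⟩
    simp only [colsFold, colsPart, List.map_cons, List.headD_cons, feed, List.tail_cons]
    cases hstep : stepCol v c with
    | none => simp
    | some c' =>
      cases hcp : colsPart vs cst with
      | none =>
        simp only [Option.map_none]
        cases feed (rs.map (fun r => r.headD 0)) c' <;> rfl
      | some l =>
        simp only [Option.map_some]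
        exact ih c' l (fun r hr => hne r (by simp [hr]))

lemma colsFold_peel_none (rows : List (List Int)) (c : Int × Int × Option Int × Option Int)
    (cst : List (Int × Int × Option Int × Option Int)) (hne : ∀ r ∈ rows, r ≠ [])
    (h : feed (rows.map (fun r => r.headD 0)) c = none) :
    colsFold rows (c :: cst) = none := by
  rw [colsFold_peel rows c cst hne, h]

lemma colsFold_peel_some (rows : List (List Int)) (c c' : Int × Int × Option Int × Option Int)
    (cst : List (Int × Int × Option Int × Option Int)) (hne : ∀ r ∈ rows, r ≠ [])
    (h : feed (rows.map (fun r => r.headD 0)) c = some c') :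
    colsFold rows (c :: cst) = (colsFold (rows.map List.tail) cst).map (c' :: ·) := by
  rw [colsFold_peel rows c cst hne, h]

lemma colsFold_nil_state : ∀ rows, colsFold rows [] = some [] := by
  intro rows
  induction rows with
  | nil => rfl
  | cons r rs ih => simp [colsFold, colsPart_nil_right, ih]

-- the final count check over an Option state list
def bfin (half : Int) : Option (List (Int × Int × Option Int × Option Int)) → Bool
  | none => false
  | some fin => fin.all (fun c => decide (c.1 ≤ half) && decide (c.2.1 ≤ half))

def colOK (half : Int) (col : List Int) : Bool :=
  noTriple3 col && decide ((col.count 0 : Int) ≤ half) && decide ((col.count 1 : Int) ≤ half)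

lemma main_zip (half : Int) : ∀ (n : Nat) (rows : List (List Int)),
    rows ≠ [] → (∀ r ∈ rows, n ≤ r.length) → (∃ r ∈ rows, r.length = n) →
    bfin half (colsFold rows (List.replicate n ((0:Int), (0:Int), (none : Option Int), (none : Option Int)))) =
      (zipCols rows).all (colOK half) := by
  intro n
  induction n with
  | zero =>
    intro rows hne _ hex
    rw [List.replicate_zero, colsFold_nil_state, zipCols]
    obtain ⟨r, hr, hlen⟩ := hex
    have hc : (rows.isEmpty || rows.any (·.isEmpty)) = true := by
      simp only [Bool.or_eq_true, List.any_eq_true]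
      right
      exact ⟨r, hr, by simpa [List.isEmpty_iff, List.length_eq_zero_iff] using hlen⟩
    rw [dif_pos hc]
    simp [bfin]
  | succ n ih =>
    intro rows hne hle hex
    have hnonempty : ∀ r ∈ rows, r ≠ [] := by
      intro r hr h
      have := hle r hr
      simp [h] at this
    have hcond : ¬ ((rows.isEmpty || rows.any (·.isEmpty)) = true) := by
      intro hcontra
      rcases (by simpa [List.isEmpty_iff, List.any_eq_true] using hcontra :
          rows = [] ∨ ∃ r ∈ rows, r = []) with h | ⟨r, hr, hemp⟩
      · exact hne h
      · exact hnonempty r hr hemp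
    rw [zipCols, dif_neg hcond]
    have ihapp := ih (rows.map List.tail)
      (by intro h; exact hne (by simpa using h))
      (by
        intro r hr
        obtain ⟨r', hr', rfl⟩ := List.mem_map.mp hr
        have := hle r' hr'
        simp only [List.length_tail]
        omega)
      (by
        obtain ⟨r, hr, hlen⟩ := hex
        exact ⟨r.tail, List.mem_map.mpr ⟨r, hr, rfl⟩, by simp [List.length_tail, hlen]⟩)
    rw [List.replicate_succ]
    by_cases h3 : noTriple3 (rows.map (fun r => r.headD 0)) = true
    · have hfeed : feed (rows.map (fun r => r.headD 0)) ((0:Int), (0:Int), (none : Option Int), (none : Option Int)) =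
          some (0 + ((rows.map (fun r => r.headD 0)).count 0 : Int),
            0 + ((rows.map (fun r => r.headD 0)).count 1 : Int),
            (lastTwo none none (rows.map (fun r => r.headD 0))).1,
            (lastTwo none none (rows.map (fun r => r.headD 0))).2) := by
        rw [feed_eq, noTF_none_none, if_pos h3]
      rw [colsFold_peel_some rows _ _ _ hnonempty hfeed]
      cases hcf : colsFold (rows.map List.tail)
          (List.replicate n ((0:Int), (0:Int), (none : Option Int), (none : Option Int))) with
      | none =>
        rw [hcf] at ihapp
        simp only [bfin] at ihapp
        simp only [Option.map_none, bfin, List.all_cons]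
        rw [← ihapp]
        simp
      | some fin =>
        rw [hcf] at ihapp
        simp only [bfin] at ihapp
        simp only [Option.map_some, bfin, List.all_cons]
        rw [ihapp]
        simp only [colOK, h3, Bool.true_and, zero_add, Bool.and_assoc]
    · have hfeed : feed (rows.map (fun r => r.headD 0)) ((0:Int), (0:Int), (none : Option Int), (none : Option Int)) = none := by
        rw [feed_eq, noTF_none_none, if_neg h3]
      rw [colsFold_peel_none rows _ _ hnonempty hfeed]
      have h3' : noTriple3 (rows.map (fun r => r.headD 0)) = false := by
        cases hx : noTriple3 (rows.map (fun r => r.headD 0))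
        · rfl
        · exact absurd hx h3
      simp only [bfin, List.all_cons, colOK, h3', Bool.false_and]

-- rowRun with fresh state is A's unit check; same for colOK
lemma rowRun_eq_unit (half : Int) (u : List Int) :
    rowRun half 0 0 none none u = isValidUnit half u := by
  rw [rowRun, noTF_none_none, isValidUnit_char]
  simp only [zero_add]
  cases noTriple3 u <;> cases decide ((u.count 0 : Int) ≤ half) <;>
    cases decide ((u.count 1 : Int) ≤ half) <;> rfl

lemma colOK_eq_unit (half : Int) (u : List Int) :
    colOK half u = isValidUnit half u := by
  rw [colOK, isValidUnit_char]
  cases noTriple3 u <;> cases decide ((u.count 0 : Int) ≤ half) <;>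
    cases decide ((u.count 1 : Int) ≤ half) <;> rfl

-- minLen facts
lemma foldl_min_le_init : ∀ (rs : List (List Int)) (a : Nat),
    rs.foldl (fun m r' => min m r'.length) a ≤ a := by
  intro rs
  induction rs with
  | nil => intro a; simp
  | cons r rs ih =>
    intro a
    simp only [List.foldl_cons]
    exact le_trans (ih _) (Nat.min_le_left _ _)

lemma foldl_min_le_mem : ∀ (rs : List (List Int)) (a : Nat) (r : List Int), r ∈ rs →
    rs.foldl (fun m r' => min m r'.length) a ≤ r.length := by
  intro rs
  induction rs with
  | nil => intro a r h; simp at h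
  | cons x xs ih =>
    intro a r hr
    simp only [List.foldl_cons]
    rcases List.mem_cons.mp hr with rfl | hr
    · exact le_trans (foldl_min_le_init xs _) (Nat.min_le_right _ _)
    · exact ih _ r hr

lemma foldl_min_attained : ∀ (rs : List (List Int)) (a : Nat),
    rs.foldl (fun m r' => min m r'.length) a = a ∨
      ∃ r ∈ rs, rs.foldl (fun m r' => min m r'.length) a = r.length := by
  intro rs
  induction rs with
  | nil => intro a; left; rfl
  | cons x xs ih =>
    intro a
    simp only [List.foldl_cons]
    rcases ih (min a x.length) with h | ⟨r, hr, h⟩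
    · rcases le_total a x.length with hle | hle
      · left; rw [h, Nat.min_eq_left hle]
      · right; exact ⟨x, by simp, by rw [h, Nat.min_eq_right hle]⟩
    · right; exact ⟨r, by simp [hr], h⟩

lemma minLen_le (rows : List (List Int)) (r : List Int) (hr : r ∈ rows) :
    minLen rows ≤ r.length := by
  cases rows with
  | nil => simp at hr
  | cons x xs =>
    rcases List.mem_cons.mp hr with rfl | hr
    · exact foldl_min_le_init xs _
    · exact foldl_min_le_mem xs _ r hr

lemma minLen_attained (rows : List (List Int)) (hne : rows ≠ []) :
    ∃ r ∈ rows, r.length = minLen rows := by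
  cases rows with
  | nil => exact absurd rfl hne
  | cons x xs =>
    rcases foldl_min_attained xs x.length with h | ⟨r, hr, h⟩
    · exact ⟨x, by simp, h.symm⟩
    · exact ⟨r, by simp [hr], h.symm⟩

-- unfold the alt's match into bfin
lemma alt_char (board : List (List Int)) :
    is_valid_binario_alt board =
      bfin (PySem.Int.floordiv (board.length : Int) 2)
        (mainFold (PySem.Int.floordiv (board.length : Int) 2) board
          (List.replicate (minLen board) ((0:Int), (0:Int), (none : Option Int), (none : Option Int)))) := rfl

-- ===== VERDICT (by name: the statement is the Claim_ definition above) =====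
theorem is_valid_binario_spec : Claim_equal_is_valid_binario := by
  intro board _
  unfold Spec_is_valid_binario
  rw [alt_char, mainFold_eq]
  cases board with
  | nil =>
    have hz : zipCols [] = [] := by rw [zipCols]; simp
    simp [is_valid_binario, colsFold, minLen, bfin, hz]
  | cons r rs =>
    set half := PySem.Int.floordiv (((r :: rs).length : Int)) 2 with hhalf
    have hA : is_valid_binario (r :: rs) =
        ((r :: rs).all (fun row => isValidUnit half row) &&
          (zipCols (r :: rs)).all (fun col => isValidUnit half col)) := rfl
    rw [hA]
    by_cases hall : (r :: rs).all (fun row => rowRun half 0 0 none none row)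
    · rw [if_pos hall]
      rw [main_zip half (minLen (r :: rs)) (r :: rs) (by simp)
        (fun row hrow => minLen_le _ row hrow) (minLen_attained _ (by simp))]
      have hall' : (r :: rs).all (fun row => isValidUnit half row) = true := by
        simpa only [rowRun_eq_unit] using hall
      rw [hall', Bool.true_and]
      congr 1
      funext col
      exact (colOK_eq_unit half col).symm
    · rw [if_neg hall]
      have hall' : (r :: rs).all (fun row => isValidUnit half row) = false := by
        rw [← Bool.not_eq_true]
        intro h
        exact hall (by simpa only [rowRun_eq_unit] using h)
      rw [hall']
      simp [bfin]
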